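-- pv_equiv track=rewrite | github.com/Burve/ComfyUI_Burve_Tools | nodes.py | _sanitize_prefix
-- ===== SOURCE A (Python) =====
-- def _sanitize_prefix(filename_prefix):
--     safe = str(filename_prefix or "Burve").strip().replace("\\", "/")
--     if not safe:
--         return "Burve"
--     parts = [part for part in safe.split("/") if part not in {"", "."}]
--     sanitized_parts = []
--     for part in parts:
--         sanitized_part = "".join(ch if ch.isalnum() or ch in ("-", "_", ".") else "_" for ch in part)
--         if sanitized_part:
--             sanitized_parts.append(sanitized_part)
--     if not sanitized_parts:
--         return "Burve"
--     return "/".join(sanitized_parts)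
-- ===== SOURCE B (Python) =====
-- def _sanitize_prefix(filename_prefix):
--     safe = str(filename_prefix or "Burve").strip()
--     parts = []
--     cur = ""
--     for ch in safe:
--         if ch == "/" or ch == "\\":
--             if cur not in ("", "."):
--                 parts.append(cur)
--             cur = ""
--         elif ch.isalnum() or ch in "-_.":
--             cur += ch
--         else:
--             cur += "_"
--     if cur not in ("", "."):
--         parts.append(cur)
--     return "/".join(parts) or "Burve"
-- ===== Notes on version B (the rewrite author's own statement) =====
-- stated objective: alternative
-- what changed: A's staged pipeline (backslash-to-slash replace, split on the separator, filter, per-part character-join loop, final join) is replaced by a single state-machine pass over the stripped string that treats both slash and backslash as separators, sanitizing characters and flushing completed parts on the fly.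
import Mathlib
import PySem

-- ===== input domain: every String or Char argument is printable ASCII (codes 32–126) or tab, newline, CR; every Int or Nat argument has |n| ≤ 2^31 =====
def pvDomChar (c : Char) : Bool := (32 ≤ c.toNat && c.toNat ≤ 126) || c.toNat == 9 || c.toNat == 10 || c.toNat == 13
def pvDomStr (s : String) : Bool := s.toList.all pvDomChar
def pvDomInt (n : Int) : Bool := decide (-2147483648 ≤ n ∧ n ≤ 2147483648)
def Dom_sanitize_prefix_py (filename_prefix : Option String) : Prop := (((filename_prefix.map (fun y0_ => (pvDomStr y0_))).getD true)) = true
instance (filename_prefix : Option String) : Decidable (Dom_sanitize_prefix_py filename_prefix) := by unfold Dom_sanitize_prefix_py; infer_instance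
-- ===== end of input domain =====

-- B replaces A's staged pipeline (backslash-to-slash replace, split, filter, per-part sanitise,
-- join) by a single state-machine pass over the stripped string that treats slash and backslash
-- as separators and flushes parts on the fly; objective: alternative (same cost, different algorithm).

-- ===== PORT A =====
-- per-character sanitiser of A's inner generator: keep alnum and - _ . , replace the rest by '_'
def pvCharA (ch : Char) : Char :=
  if PySem.Chars.isalnum ch || ch == '-' || ch == '_' || ch == '.' then ch else '_'

def sanitize_prefix_py (filename_prefix : Option String) : String :=
  let safe : List Char :=
    PySem.Chars.replace
      (PySem.Chars.strip
        (match filename_prefix with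
          | none => "Burve"
          | some s => if s = "" then "Burve" else s).toList) ['\\'] ['/']
  if safe = [] then "Burve"
  else
    let parts := (PySem.Chars.splitOn safe ['/']).filter (fun p => !(p == [] || p == ['.']))
    let sanitized_parts := parts.foldl (fun acc part =>
      if !(part.map pvCharA == []) then acc ++ [part.map pvCharA] else acc) ([] : List (List Char))
    if sanitized_parts = [] then "Burve"
    else String.ofList (PySem.Chars.join ['/'] sanitized_parts)

-- ===== PORT B =====
-- B's flush: `if cur not in ("", "."): parts.append(cur)` (used at a separator and at the end)
def pvFlush (parts : List (List Char)) (cur : List Char) : List (List Char) :=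
  if cur = [] ∨ cur = ['.'] then parts else parts ++ [cur]

-- B's loop body: separator flushes, whitelisted char is kept, anything else becomes '_'
def pvStep (st : List (List Char) × List Char) (ch : Char) : List (List Char) × List Char :=
  if ch == '/' || ch == '\\' then (pvFlush st.1 st.2, [])
  else if PySem.Chars.isalnum ch || ch == '-' || ch == '_' || ch == '.' then (st.1, st.2 ++ [ch])
  else (st.1, st.2 ++ ['_'])

def sanitize_prefix_py_alt (filename_prefix : Option String) : String :=
  let safe : List Char :=
    PySem.Chars.strip
      (match filename_prefix with
        | none => "Burve"
        | some s => if s = "" then "Burve" else s).toList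
  let st := safe.foldl pvStep (([], []) : List (List Char) × List Char)
  let parts := pvFlush st.1 st.2
  let out := PySem.Chars.join ['/'] parts
  if out = [] then "Burve" else String.ofList out

-- ===== PRECONDITION & SPEC =====
def Spec_sanitize_prefix_py (filename_prefix : Option String) (out : String) : Prop := out = sanitize_prefix_py_alt filename_prefix
instance (filename_prefix : Option String) (out : String) : Decidable (Spec_sanitize_prefix_py filename_prefix out) := by unfold Spec_sanitize_prefix_py; infer_instance

-- ===== CLAIM (what is proved, stated in full; the proofs are below) =====
def Claim_equal_sanitize_prefix_py : Prop := ∀ (filename_prefix : Option String), Dom_sanitize_prefix_py filename_prefix → Spec_sanitize_prefix_py filename_prefix (sanitize_prefix_py filename_prefix)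

-- ===== LEMMAS AND PROOFS =====

-- the map performed by A's single-character replace("\\", "/")
def pvRep (c : Char) : Char := if c = '\\' then '/' else c

-- raw split of the UNreplaced string on both separators (proof-only reference splitter)
def pvRawSplit : List Char → List (List Char)
  | [] => [[]]
  | c :: t =>
    if c = '/' ∨ c = '\\' then [] :: pvRawSplit t
    else
      match pvRawSplit t with
      | [] => [[c]]
      | h :: r => (c :: h) :: r

-- prepend to the head part (empty list: a single part)
def pvHeadCons (x : List Char) : List (List Char) → List (List Char)
  | [] => [x]
  | h :: r => (x ++ h) :: r

theorem pvRawSplit_ne_nil (l : List Char) : pvRawSplit l ≠ [] := by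
  cases l with
  | nil => simp [pvRawSplit]
  | cons c t =>
    unfold pvRawSplit
    split_ifs with h
    · simp
    · cases pvRawSplit t <;> simp

theorem replace_go_eq (l : List Char) : ∀ (fuel : Nat) (acc : List Char), l.length ≤ fuel →
    PySem.Chars.replace.go ['\\'] ['/'] fuel l acc = acc.reverse ++ l.map pvRep := by
  induction l with
  | nil =>
    intro fuel acc _
    cases fuel <;> rw [PySem.Chars.replace.go.eq_def] <;> simp
  | cons c t ih =>
    intro fuel acc hf
    cases fuel with
    | zero => simp at hf
    | succ n =>
      rw [PySem.Chars.replace.go.eq_def]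
      simp only [List.isPrefixOf, Bool.and_true]
      by_cases hc : c = '\\'
      · subst hc
        simp only [beq_self_eq_true, if_true, List.length_cons, List.length_nil,
          List.drop_succ_cons, List.drop_zero]
        rw [ih n _ (by simpa using hf)]
        simp [pvRep]
      · have h1 : ('\\' == c) = false := by simp [Ne.symm hc]
        simp only [h1, Bool.false_eq_true, if_false]
        rw [ih n _ (by simpa using hf)]
        simp [pvRep, hc]

theorem replace_eq_map (l : List Char) :
    PySem.Chars.replace l ['\\'] ['/'] = l.map pvRep := by
  unfold PySem.Chars.replace
  simpa using replace_go_eq l l.length [] le_rfl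

-- splitting the replaced string on '/' is the raw split of the original on '/' and '\'
theorem splitOn_go_raw (l : List Char) : ∀ (fuel : Nat) (cur : List Char) (acc : List (List Char)),
    l.length < fuel →
    PySem.Chars.splitOn.go ['/'] fuel (l.map pvRep) cur acc
      = acc.reverse ++ pvHeadCons cur.reverse (pvRawSplit l) := by
  induction l with
  | nil =>
    intro fuel cur acc hf
    cases fuel with
    | zero => simp at hf
    | succ n =>
      rw [PySem.Chars.splitOn.go.eq_def]
      simp [pvRawSplit, pvHeadCons]
  | cons c t ih =>
    intro fuel cur acc hf
    cases fuel with
    | zero => simp at hf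
    | succ n =>
      rw [PySem.Chars.splitOn.go.eq_def]
      simp only [List.map_cons, List.isPrefixOf, Bool.and_true]
      by_cases hc : c = '/' ∨ c = '\\'
      · have hrc : pvRep c = '/' := by
          rcases hc with h | h <;> subst h <;> simp [pvRep]
        rw [hrc]
        simp only [beq_self_eq_true, if_true, List.length_cons, List.length_nil,
          List.drop_succ_cons, List.drop_zero]
        rw [ih n [] (cur.reverse :: acc) (by simpa using hf)]
        have : pvRawSplit (c :: t) = [] :: pvRawSplit t := by
          simp only [pvRawSplit]; rw [if_pos hc]
        rw [this]
        obtain ⟨h, r, hr⟩ : ∃ h r, pvRawSplit t = h :: r := by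
          cases hE : pvRawSplit t with
          | nil => exact absurd hE (pvRawSplit_ne_nil t)
          | cons h r => exact ⟨h, r, rfl⟩
        simp [hr, pvHeadCons]
  
      · push_neg at hc
        have hrc : pvRep c = c := by simp [pvRep, hc.2]
        have hne : ('/' == pvRep c) = false := by simp [hrc, Ne.symm hc.1]
        simp only [hne, Bool.false_eq_true, if_false]
        rw [hrc, ih n (c :: cur) acc (by simpa using hf)]
        have : pvRawSplit (c :: t) =
            match pvRawSplit t with
            | [] => [[c]]
            | h :: r => (c :: h) :: r := by
          simp only [pvRawSplit]; rw [if_neg (by tauto)]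
        rw [this]
        obtain ⟨h, r, hr⟩ : ∃ h r, pvRawSplit t = h :: r := by
          cases hE : pvRawSplit t with
          | nil => exact absurd hE (pvRawSplit_ne_nil t)
          | cons h r => exact ⟨h, r, rfl⟩
        simp [hr, pvHeadCons]

theorem splitOn_raw (l : List Char) :
    PySem.Chars.splitOn (PySem.Chars.replace l ['\\'] ['/']) ['/'] = pvRawSplit l := by
  rw [replace_eq_map]
  unfold PySem.Chars.splitOn
  rw [List.length_map]
  rw [splitOn_go_raw l (l.length + 1) [] [] (by omega)]
  obtain ⟨h, r, hr⟩ : ∃ h r, pvRawSplit l = h :: r := by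
    cases hE : pvRawSplit l with
    | nil => exact absurd hE (pvRawSplit_ne_nil l)
    | cons h r => exact ⟨h, r, rfl⟩
  simp [hr, pvHeadCons]

-- sanitising split: what B's running state computes (proof-only reference)
def pvSanSplit : List Char → List Char → List (List Char)
  | [], cur => [cur]
  | c :: t, cur =>
    if c = '/' ∨ c = '\\' then cur :: pvSanSplit t []
    else pvSanSplit t (cur ++ [pvCharA c])

-- B's fold, flushed, filters the sanitising split
theorem foldB_eq (l : List Char) : ∀ (parts : List (List Char)) (cur : List Char),
    (let st := l.foldl pvStep (parts, cur); pvFlush st.1 st.2)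
      = parts ++ (pvSanSplit l cur).filter (fun p => !(p == [] || p == ['.'])) := by
  induction l with
  | nil =>
    intro parts cur
    simp only [List.foldl_nil, pvSanSplit]
    by_cases h : cur = [] ∨ cur = ['.']
    · have hq : (!(cur == [] || cur == ['.'])) = false := by
        rcases h with h | h <;> subst h <;> simp
      rw [List.filter_cons, hq]
      unfold pvFlush
      rw [if_pos h]
      simp
    · push_neg at h
      have hq : (!(cur == [] || cur == ['.'])) = true := by simp [h.1, h.2]
      rw [List.filter_cons, hq]
      unfold pvFlush
      rw [if_neg (show ¬(cur = [] ∨ cur = ['.']) by tauto)]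
      simp
  | cons c t ih =>
    intro parts cur
    simp only [List.foldl_cons]
    by_cases hc : c = '/' ∨ c = '\\'
    · have hstep : pvStep (parts, cur) c = (pvFlush parts cur, []) := by
        unfold pvStep
        have : (c == '/' || c == '\\') = true := by
          rcases hc with h | h <;> subst h <;> simp
        simp [this]
      rw [hstep, ih]
      have hsplit : pvSanSplit (c :: t) cur = cur :: pvSanSplit t [] := by
        simp only [pvSanSplit]; rw [if_pos hc]
      rw [hsplit, List.filter_cons]
      by_cases h : cur = [] ∨ cur = ['.']
      · have hq : (!(cur == [] || cur == ['.'])) = false := by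
          rcases h with h | h <;> subst h <;> simp
        rw [hq]
        unfold pvFlush
        rw [if_pos h]
        simp
      · push_neg at h
        have hq : (!(cur == [] || cur == ['.'])) = true := by simp [h.1, h.2]
        rw [hq]
        unfold pvFlush
        rw [if_neg (show ¬(cur = [] ∨ cur = ['.']) by tauto)]
        simp
    · push_neg at hc
      have hstep : pvStep (parts, cur) c = (parts, cur ++ [pvCharA c]) := by
        unfold pvStep
        have h1 : (c == '/' || c == '\\') = false := by simp [hc.1, hc.2]
        rw [h1]
        simp only [Bool.false_eq_true, if_false]
        unfold pvCharA
        by_cases h2 : (PySem.Chars.isalnum c || c == '-' || c == '_' || c == '.') = true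
        · simp [h2]
        · simp only [Bool.not_eq_true] at h2
          simp [h2]
      rw [hstep, ih]
      have hsplit : pvSanSplit (c :: t) cur = pvSanSplit t (cur ++ [pvCharA c]) := by
        simp only [pvSanSplit]; rw [if_neg (by tauto)]
      rw [hsplit]

-- the sanitising split is the raw split, sanitised part by part
theorem sanSplit_raw (l : List Char) : ∀ (cur : List Char),
    pvSanSplit l cur = pvHeadCons cur ((pvRawSplit l).map (List.map pvCharA)) := by
  induction l with
  | nil => intro cur; simp [pvSanSplit, pvRawSplit, pvHeadCons]
  | cons c t ih =>
    intro cur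
    obtain ⟨h, r, hr⟩ : ∃ h r, pvRawSplit t = h :: r := by
      cases hE : pvRawSplit t with
      | nil => exact absurd hE (pvRawSplit_ne_nil t)
      | cons h r => exact ⟨h, r, rfl⟩
    by_cases hc : c = '/' ∨ c = '\\'
    · have h1 : pvSanSplit (c :: t) cur = cur :: pvSanSplit t [] := by
        simp only [pvSanSplit]; rw [if_pos hc]
      have h2 : pvRawSplit (c :: t) = [] :: pvRawSplit t := by
        simp only [pvRawSplit]; rw [if_pos hc]
      rw [h1, h2, ih [], hr]
      simp [pvHeadCons]
    · have h1 : pvSanSplit (c :: t) cur = pvSanSplit t (cur ++ [pvCharA c]) := by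
        simp only [pvSanSplit]; rw [if_neg (by tauto)]
      have h2 : pvRawSplit (c :: t) = (c :: h) :: r := by
        simp only [pvRawSplit]; rw [if_neg (by tauto), hr]
      rw [h1, h2, ih, hr]
      simp [pvHeadCons]

-- pvCharA maps '.' to '.' and nothing else to '.'
theorem pvCharA_dot_iff (c : Char) : pvCharA c = '.' ↔ c = '.' := by
  unfold pvCharA
  split_ifs with h
  · constructor <;> (intro hc; exact hc)
  · constructor
    · intro hc; exact absurd hc (by decide)
    · intro hc; subst hc; simp at h

-- pvCharA sends exactly ['.'] to ['.']
theorem map_pvCharA_dot (p : List Char) : p.map pvCharA = ['.'] ↔ p = ['.'] := by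
  cases p with
  | nil => simp
  | cons a t => simp [pvCharA_dot_iff, List.map_eq_nil_iff]

-- the '' / '.' filter is blind to A's per-part sanitising map
theorem q_map_pvCharA (p : List Char) :
    (!(p.map pvCharA == [] || p.map pvCharA == ['.'])) = (!(p == [] || p == ['.'])) := by
  have h : (List.map pvCharA p == ['.']) = (p == ['.']) := by
    rw [Bool.eq_iff_iff]; simp only [beq_iff_eq]; exact map_pvCharA_dot p
  simp [h, List.map_eq_nil_iff]

-- A's append-if fold over the filtered parts is a per-part map
theorem foldA_eq (L : List (List Char)) :
    (L.filter (fun p => !(p == [] || p == ['.']))).foldl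
      (fun acc part => if !(part.map pvCharA == []) then acc ++ [part.map pvCharA] else acc)
      ([] : List (List Char))
    = (L.filter (fun p => !(p == [] || p == ['.']))).map (List.map pvCharA) := by
  rw [PySem.List.foldl_append_if]
  simp only [List.nil_append]
  have hfil : List.filter (fun x => !(x.map pvCharA == []))
      (L.filter (fun p => !(p == [] || p == ['.'])))
      = L.filter (fun p => !(p == [] || p == ['.'])) := by
    apply List.filter_eq_self.2
    intro x hx
    have hq := (List.mem_filter.1 hx).2
    simp only [Bool.not_eq_true', beq_eq_false_iff_ne, ne_eq, List.map_eq_nil_iff]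
    intro hnil
    subst hnil
    simp at hq
  rw [hfil]

-- map-then-filter = filter-then-map for the '' / '.' filter
theorem filter_map_comm (L : List (List Char)) :
    (L.map (List.map pvCharA)).filter (fun p => !(p == [] || p == ['.']))
      = (L.filter (fun p => !(p == [] || p == ['.']))).map (List.map pvCharA) := by
  rw [List.filter_map]
  congr 1
  apply List.filter_congr
  intro p _
  exact q_map_pvCharA p

-- a '/'-join of a nonempty list of nonempty pieces is nonempty
theorem join_ne_nil (L : List (List Char)) (h0 : L ≠ []) (h1 : ∀ p ∈ L, p ≠ []) :
    PySem.Chars.join ['/'] L ≠ [] := by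
  cases L with
  | nil => exact absurd rfl h0
  | cons p rest =>
    have hp : p ≠ [] := h1 p (List.mem_cons_self ..)
    cases rest with
    | nil => simpa [PySem.Chars.join, List.intercalate] using hp
    | cons q rest' =>
      simp [PySem.Chars.join, List.intercalate, List.intersperse]

theorem main_eq (filename_prefix : Option String) :
    sanitize_prefix_py filename_prefix = sanitize_prefix_py_alt filename_prefix := by
  unfold sanitize_prefix_py sanitize_prefix_py_alt
  set s0 : List Char :=
    PySem.Chars.strip
      (match filename_prefix with
        | none => "Burve"
        | some s => if s = "" then "Burve" else s).toList with hs0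
  simp only []
  have hB : (let st := s0.foldl pvStep (([], []) : List (List Char) × List Char);
      pvFlush st.1 st.2)
      = ((pvRawSplit s0).map (List.map pvCharA)).filter (fun p => !(p == [] || p == ['.'])) := by
    rw [foldB_eq, sanSplit_raw]
    obtain ⟨h, r, hr⟩ : ∃ h r, pvRawSplit s0 = h :: r := by
      cases hE : pvRawSplit s0 with
      | nil => exact absurd hE (pvRawSplit_ne_nil s0)
      | cons h r => exact ⟨h, r, rfl⟩
    simp [hr, pvHeadCons]
  by_cases hz : s0 = []
  · rw [hz]
    have : PySem.Chars.replace ([] : List Char) ['\\'] ['/'] = [] := by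
      rw [replace_eq_map]; simp
    rw [this]
    simp [pvStep, pvFlush, PySem.Chars.join, List.intercalate]
  · have hrepl : PySem.Chars.replace s0 ['\\'] ['/'] ≠ [] := by
      rw [replace_eq_map]
      simpa using hz
    rw [if_neg hrepl, splitOn_raw, foldA_eq, ← filter_map_comm]
    set P := ((pvRawSplit s0).map (List.map pvCharA)).filter
        (fun p => !(p == [] || p == ['.'])) with hP
    have hBP : (let st := s0.foldl pvStep (([], []) : List (List Char) × List Char);
        pvFlush st.1 st.2) = P := hB
    rw [hBP]
    have hmem : ∀ p ∈ P, p ≠ [] := by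
      intro p hp hnil
      have hq := (List.mem_filter.1 hp).2
      subst hnil
      simp at hq
    by_cases hPe : P = []
    · rw [hPe]
      simp [PySem.Chars.join, List.intercalate]
    · rw [if_neg hPe, if_neg (join_ne_nil P hPe hmem)]

-- ===== VERDICT (by name: the statement is the Claim_ definition above) =====
theorem sanitize_prefix_py_spec : Claim_equal_sanitize_prefix_py := by
  intro fp _
  unfold Spec_sanitize_prefix_py
  exact main_eq fp
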